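-- pv_equiv track=rewrite | github.com/dudamarlena/pyc_source | pycfiles/quickder.rfc-1.4.0-py3.7/testdata.cpython-37.py | der_prefixhead
-- ===== SOURCE A (Python) =====
-- def der_prefixhead(tag, body):
--     blen = len(body)
--     if blen == 0:
--         lenh = chr(0)
--     else:
--         if blen <= 127:
--             lenh = chr(blen)
--         else:
--             lenh = ''
--             while blen > 0:
--                 lenh = chr(blen % 256) + lenh
--                 blen >>= 8
--
--             lenh = chr(128 + len(lenh)) + lenh
--     return chr(tag) + lenh + body
-- ===== SOURCE B (Python) =====
-- def der_prefixhead(tag, body):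
--     n = len(body)
--     if n <= 127:
--         lenh = chr(n)
--     else:
--         nbytes = (n.bit_length() + 7) // 8
--         lenh = chr(128 + nbytes) + ''.join(
--             chr((n >> (8 * (nbytes - 1 - i))) & 255) for i in range(nbytes))
--     return chr(tag) + lenh + body
-- ===== Notes on version B (the rewrite author's own statement) =====
-- stated objective: simpler
-- what changed: The byte-by-byte while loop that prepends length bytes (and its separate blen==0 branch) is replaced by a closed-form byte count from bit_length and a single front-to-back join of shifted bytes.
import Mathlib
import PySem

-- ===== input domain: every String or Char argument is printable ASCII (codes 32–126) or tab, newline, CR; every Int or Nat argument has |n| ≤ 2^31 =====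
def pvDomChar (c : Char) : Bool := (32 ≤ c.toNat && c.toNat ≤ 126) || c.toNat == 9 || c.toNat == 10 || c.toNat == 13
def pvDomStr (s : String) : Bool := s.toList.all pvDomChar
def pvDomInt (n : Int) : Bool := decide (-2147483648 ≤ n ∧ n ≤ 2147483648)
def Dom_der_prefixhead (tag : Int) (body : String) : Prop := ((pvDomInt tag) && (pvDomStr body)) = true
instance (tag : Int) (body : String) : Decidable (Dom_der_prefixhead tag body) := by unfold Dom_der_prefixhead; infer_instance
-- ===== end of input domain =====

-- B replaces the byte-extraction while loop (and the separate blen==0 branch) by a closed-form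
-- byte count from bit_length and a single big-endian join; objective: simpler.

-- ===== PORT A =====
-- the `while blen > 0:` loop: lenh = chr(blen % 256) + lenh; blen >>= 8
def derLoopA (blen : Nat) (lenh : List Char) : List Char :=
  if blen > 0 then derLoopA (blen / 256) (Char.ofNat (blen % 256) :: lenh) else lenh
termination_by blen
decreasing_by exact Nat.div_lt_self (by omega) (by norm_num)

-- chr(k) is ported as Char.ofNat k: exact for codes admitted by Pre_ (valid non-surrogate
-- code points); all length bytes are < 256, hence always exact there.
def der_prefixhead (tag : Int) (body : String) : String :=
  let blen := body.toList.length
  let lenh : List Char :=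
    if blen = 0 then [Char.ofNat 0]
    else if blen ≤ 127 then [Char.ofNat blen]
    else
      let l := derLoopA blen []
      Char.ofNat (128 + l.length) :: l
  String.ofList (Char.ofNat tag.toNat :: (lenh ++ body.toList))

-- ===== PORT B =====
-- ''.join(chr((n >> (8*(nbytes-1-i))) & 255) for i in range(nbytes))
def derBytesBE (n nbytes : Nat) : List Char :=
  (List.range nbytes).map (fun i => Char.ofNat ((n >>> (8 * (nbytes - 1 - i))) % 256))

def der_prefixhead_alt (tag : Int) (body : String) : String :=
  let n := body.toList.length
  let lenh : List Char :=
    if n ≤ 127 then [Char.ofNat n]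
    else
      let nbytes := (PySem.Int.bitLength (n : Int) + 7) / 8
      Char.ofNat (128 + nbytes) :: derBytesBE n nbytes
  String.ofList (Char.ofNat tag.toNat :: (lenh ++ body.toList))

-- ===== PRECONDITION & SPEC =====
-- Pre_ excludes tags outside chr's range (Python raises ValueError there) and the surrogate
-- range 0xD800–0xDFFF, where Python's chr returns a lone surrogate that a Lean Char/String
-- cannot represent (not a value of the declared type under the convention).
def Pre_der_prefixhead (tag : Int) (body : String) : Prop :=
  0 ≤ tag ∧ tag < 1114112 ∧ ¬(55296 ≤ tag ∧ tag < 57344)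
instance (tag : Int) (body : String) : Decidable (Pre_der_prefixhead tag body) := by
  unfold Pre_der_prefixhead; infer_instance

def pvWitness_der_prefixhead : Int × String := (48, "hello")

def Spec_der_prefixhead (tag : Int) (body : String) (out : String) : Prop := out = der_prefixhead_alt tag body
instance (tag : Int) (body : String) (out : String) : Decidable (Spec_der_prefixhead tag body out) := by unfold Spec_der_prefixhead; infer_instance

-- ===== CLAIM (what is proved, stated in full; the proofs are below) =====
def Claim_equal_der_prefixhead : Prop := ∀ (tag : Int) (body : String), Dom_der_prefixhead tag body → Pre_der_prefixhead tag body → Spec_der_prefixhead tag body (der_prefixhead tag body)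

-- ===== LEMMAS AND PROOFS =====

-- number of base-256 digits, as A's loop counts them
def numBytes (n : Nat) : Nat :=
  if n > 0 then numBytes (n / 256) + 1 else 0
termination_by n
decreasing_by exact Nat.div_lt_self (by omega) (by norm_num)

lemma derBytesBE_succ (n k : Nat) :
    derBytesBE n (k + 1) = derBytesBE (n / 256) k ++ [Char.ofNat (n % 256)] := by
  unfold derBytesBE
  rw [List.range_succ, List.map_append]
  congr 1
  · apply List.map_congr_left
    intro i hi
    have hik : i < k := List.mem_range.mp hi
    congr 1
    have h1 : n >>> (8 * (k + 1 - 1 - i)) = n / 2 ^ (8 * (k - i)) := by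
      rw [Nat.shiftRight_eq_div_pow]
      have he : k + 1 - 1 - i = k - i := by omega
      rw [he]
    have h2 : (n / 256) >>> (8 * (k - 1 - i)) = n / 2 ^ (8 * (k - i)) := by
      rw [Nat.shiftRight_eq_div_pow, Nat.div_div_eq_div_mul]
      congr 1
      have h256 : (256 : Nat) = 2 ^ 8 := by norm_num
      rw [h256, ← pow_add]
      congr 1; omega
    rw [h1, h2]
  · simp [Nat.shiftRight_eq_div_pow]

lemma derLoopA_eq (n : Nat) : ∀ acc, derLoopA n acc = derBytesBE n (numBytes n) ++ acc := by
  induction n using Nat.strong_induction_on with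
  | _ n ih =>
    intro acc
    unfold derLoopA numBytes
    by_cases h : n > 0
    · simp only [h, if_true]
      rw [ih (n / 256) (Nat.div_lt_self h (by norm_num)),
        derBytesBE_succ, List.append_assoc]
      rfl
    · simp [h, derBytesBE]

lemma length_derBytesBE (n k : Nat) : (derBytesBE n k).length = k := by
  simp [derBytesBE]

lemma bitLength_halve (m : Nat) (h : 0 < m) :
    PySem.Int.bitLength (m : Int) = PySem.Int.bitLength ((m / 2 : Nat) : Int) + 1 :=
  PySem.Int.bitLength_natCast h

lemma bitLength_div256 (n : Nat) (h : 256 ≤ n) :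
    PySem.Int.bitLength (n : Int) = PySem.Int.bitLength ((n / 256 : Nat) : Int) + 8 := by
  have e1 := bitLength_halve n (by omega)
  have e2 := bitLength_halve (n / 2) (by omega)
  have e3 := bitLength_halve (n / 2 / 2) (by omega)
  have e4 := bitLength_halve (n / 2 / 2 / 2) (by omega)
  have e5 := bitLength_halve (n / 2 / 2 / 2 / 2) (by omega)
  have e6 := bitLength_halve (n / 2 / 2 / 2 / 2 / 2) (by omega)
  have e7 := bitLength_halve (n / 2 / 2 / 2 / 2 / 2 / 2) (by omega)
  have e8 := bitLength_halve (n / 2 / 2 / 2 / 2 / 2 / 2 / 2) (by omega)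
  have hd : n / 2 / 2 / 2 / 2 / 2 / 2 / 2 / 2 = n / 256 := by
    simp [Nat.div_div_eq_div_mul]
  rw [e1, e2, e3, e4, e5, e6, e7, e8, hd]

lemma bitLength_le_of_lt (m k : Nat) (h : m < 2 ^ k) : PySem.Int.bitLength (m : Int) ≤ k := by
  by_cases hm : m = 0
  · subst hm
    simp [PySem.Int.bitLength_zero]
  · by_contra hc
    push Not at hc
    have h2' := PySem.Int.two_pow_bitLength_le (m : Int) (by exact_mod_cast hm)
    have hmono : (2 : Nat) ^ k ≤ 2 ^ (PySem.Int.bitLength (m : Int) - 1) :=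
      Nat.pow_le_pow_right (by norm_num) (by omega)
    simp only [Int.natAbs_natCast] at h2'
    omega

lemma lt_of_bitLength (m : Nat) : m < 2 ^ PySem.Int.bitLength (m : Int) := by
  have := PySem.Int.lt_two_pow_bitLength (m : Int)
  simpa using this

lemma numBytes_eq (n : Nat) (h : 0 < n) :
    numBytes n = (PySem.Int.bitLength (n : Int) + 7) / 8 := by
  induction n using Nat.strong_induction_on with
  | _ n ih =>
    by_cases hs : n ≤ 255
    · have h1 : numBytes n = 1 := by
        unfold numBytes
        simp only [h, if_true]
        have : n / 256 = 0 := by omega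
        rw [this]; unfold numBytes; simp
      have hb1 : 1 ≤ PySem.Int.bitLength (n : Int) := by
        by_contra hc
        push Not at hc
        have hlt := lt_of_bitLength n
        have hz : PySem.Int.bitLength (n : Int) = 0 := by omega
        rw [hz] at hlt
        norm_num at hlt
        omega
      have hb8 : PySem.Int.bitLength (n : Int) ≤ 8 :=
        bitLength_le_of_lt n 8 (by omega)
      rw [h1]; omega
    · push Not at hs
      have hq : 0 < n / 256 := by omega
      have ihq := ih (n / 256) (Nat.div_lt_self h (by norm_num)) hq
      have hstep : numBytes n = numBytes (n / 256) + 1 := by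
        conv_lhs => unfold numBytes
        simp [h]
      have hbl := bitLength_div256 n (by omega)
      have hb9 : 9 ≤ PySem.Int.bitLength (n : Int) := by
        by_contra hc
        push Not at hc
        have hlt := lt_of_bitLength n
        have hmono : (2 : Nat) ^ PySem.Int.bitLength (n : Int) ≤ 2 ^ 8 :=
          Nat.pow_le_pow_right (by norm_num) (by omega)
        norm_num at hmono
        omega
      rw [hstep, ihq, hbl]
      omega

-- ===== VERDICT (by name: the statement is the Claim_ definition above) =====
theorem der_prefixhead_spec : Claim_equal_der_prefixhead := by
  intro tag body _ _
  unfold Spec_der_prefixhead der_prefixhead der_prefixhead_alt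
  set n := body.toList.length with hn
  by_cases h0 : n = 0
  · simp [h0]
  · by_cases h127 : n ≤ 127
    · simp [h0, h127]
    · simp only [h0, h127, if_false]
      have hpos : 0 < n := by omega
      rw [derLoopA_eq n [], List.append_nil, length_derBytesBE, numBytes_eq n hpos]
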